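-- pv_equiv track=rewrite | github.com/mulkkog/Bacteria | code/ood/tf_test_cnn_cali_TempScaling.py | find_all_stable_segments
-- ===== SOURCE A (Python) =====
-- def find_all_stable_segments(summed_diffs, peaks, buffer_size):
--     total_frames = len(summed_diffs)
--     excluded_indices = set()
--     for peak in peaks:
--         for i in range(max(0, peak - buffer_size), min(total_frames, peak + buffer_size + 1)):
--             excluded_indices.add(i)
--     valid_frames = [i for i in range(total_frames) if i not in excluded_indices]
--     return valid_frames
-- ===== SOURCE B (Python) =====
-- def find_all_stable_segments(summed_diffs, peaks, buffer_size):
--     # Inverted structure: no excluded-index set is built; each frame is kept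
--     # iff it is farther than buffer_size from every peak.
--     n = len(summed_diffs)
--     return [i for i in range(n) if all(abs(i - p) > buffer_size for p in peaks)]
-- ===== Notes on version B (the rewrite author's own statement) =====
-- stated objective: simpler
-- what changed: Instead of marking a set of excluded indices by iterating a clamped range per peak and then filtering, B filters each frame directly by the distance predicate all(abs(i-p) > buffer_size), so no set and no per-peak range loop exist.
import Mathlib
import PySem

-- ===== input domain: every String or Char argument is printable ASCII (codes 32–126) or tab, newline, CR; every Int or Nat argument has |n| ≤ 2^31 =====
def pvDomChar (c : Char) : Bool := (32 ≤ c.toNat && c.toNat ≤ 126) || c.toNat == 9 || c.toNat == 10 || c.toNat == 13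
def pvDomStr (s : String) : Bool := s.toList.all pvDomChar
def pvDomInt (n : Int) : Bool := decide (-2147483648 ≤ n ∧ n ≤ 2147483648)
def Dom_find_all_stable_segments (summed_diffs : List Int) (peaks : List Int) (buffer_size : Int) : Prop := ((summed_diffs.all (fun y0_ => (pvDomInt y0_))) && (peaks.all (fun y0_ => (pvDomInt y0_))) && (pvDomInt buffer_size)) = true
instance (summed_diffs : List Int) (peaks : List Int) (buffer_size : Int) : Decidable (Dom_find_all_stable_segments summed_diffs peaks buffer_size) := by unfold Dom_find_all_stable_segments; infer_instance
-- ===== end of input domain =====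

-- B drops A's excluded-index set and per-peak range marking: each frame is kept iff it is
-- farther than buffer_size from every peak (simpler, same exact result).

-- ===== PORT A =====
def find_all_stable_segments (summed_diffs : List Int) (peaks : List Int) (buffer_size : Int) : List Int :=
  let total_frames : Int := summed_diffs.length
  let excluded_indices : PySem.Set Int := peaks.foldl
    (fun s peak =>
      (PySem.List.pyRange (max 0 (peak - buffer_size)) (min total_frames (peak + buffer_size + 1)) 1).foldl
        PySem.Set.add s)
    PySem.Set.empty
  (PySem.List.pyRange 0 total_frames 1).filter (fun i => !(PySem.Set.contains excluded_indices i))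

-- ===== PORT B =====
def find_all_stable_segments_alt (summed_diffs : List Int) (peaks : List Int) (buffer_size : Int) : List Int :=
  (PySem.List.pyRange 0 (summed_diffs.length : Int) 1).filter
    (fun i => peaks.all (fun p => decide (buffer_size < |i - p|)))

-- ===== PRECONDITION & SPEC =====
def Spec_find_all_stable_segments (summed_diffs : List Int) (peaks : List Int) (buffer_size : Int) (out : List Int) : Prop := out = find_all_stable_segments_alt summed_diffs peaks buffer_size
instance (summed_diffs : List Int) (peaks : List Int) (buffer_size : Int) (out : List Int) : Decidable (Spec_find_all_stable_segments summed_diffs peaks buffer_size out) := by unfold Spec_find_all_stable_segments; infer_instance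

-- ===== CLAIM (what is proved, stated in full; the proofs are below) =====
def Claim_equal_find_all_stable_segments : Prop := ∀ (summed_diffs : List Int) (peaks : List Int) (buffer_size : Int), Dom_find_all_stable_segments summed_diffs peaks buffer_size → Spec_find_all_stable_segments summed_diffs peaks buffer_size (find_all_stable_segments summed_diffs peaks buffer_size)

-- ===== LEMMAS AND PROOFS =====

-- membership in the set built by folding Set.add over one range per peak
lemma mem_foldl_update (peaks : List Int) (r : Int → List Int) (s : PySem.Set Int) (x : Int) :
    x ∈ peaks.foldl (fun s p => (r p).foldl PySem.Set.add s) s ↔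
      x ∈ s ∨ ∃ p ∈ peaks, x ∈ r p := by
  induction peaks generalizing s with
  | nil => simp
  | cons p ps ih =>
    have h : (r p).foldl PySem.Set.add s = PySem.Set.update s (r p) := rfl
    simp [List.foldl_cons, ih, h, PySem.Set.mem_update, or_assoc]

lemma equiv_main (summed_diffs : List Int) (peaks : List Int) (buffer_size : Int) :
    find_all_stable_segments summed_diffs peaks buffer_size
      = find_all_stable_segments_alt summed_diffs peaks buffer_size := by
  unfold find_all_stable_segments find_all_stable_segments_alt
  apply List.filter_congr
  intro i hi
  rw [PySem.List.mem_pyRange_one] at hi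
  rw [Bool.eq_iff_iff]
  simp only [Bool.not_eq_eq_eq_not, Bool.not_true, PySem.Set.contains, List.all_eq_true,
    decide_eq_true_eq, ← Bool.not_eq_true,
    List.contains_iff_mem, mem_foldl_update, PySem.List.mem_pyRange_one]
  constructor
  · intro h p hp
    by_contra hc
    exact h (.inr ⟨p, hp, by rw [lt_abs] at hc; push Not at hc; omega⟩)
  · rintro h (hs | ⟨p, hp, hlo, hhi⟩)
    · simp [PySem.Set.empty] at hs
    · have := h p hp
      rw [lt_abs] at this
      omega

-- ===== VERDICT (by name: the statement is the Claim_ definition above) =====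
theorem find_all_stable_segments_spec : Claim_equal_find_all_stable_segments := by
  intro sd peaks b _
  exact equiv_main sd peaks b
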